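-- pv_equiv track=rewrite | github.com/daviddimic/Global-Register-Allocation | graphColoring.py | min_color
-- ===== SOURCE A (Python) =====
-- def min_color(coloring, k, adjacents):
--     """
--     get first available color from k colors
--     """
--     all_possible_colors = list(range(k-1, -1, -1))
--     #from all colors remove color of adjecents
--     for adj in adjacents:
--
--         #first: color neighbour if he's not colored with 0
--         if adj not in coloring.keys():
--             coloring[adj] = 0
--
--         if coloring[adj] in all_possible_colors:
--             all_possible_colors.remove(coloring[adj])
--
--     if len(all_possible_colors) == 0:
--         return None
--
--     return all_possible_colors.pop()
-- ===== SOURCE B (Python) =====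
-- def min_color(coloring, k, adjacents):
--     """
--     get first available color from k colors
--     """
--     # same side effect as A: uncolored adjacents get color 0
--     used = []
--     for adj in adjacents:
--         if adj not in coloring:
--             coloring[adj] = 0
--         used.append(coloring[adj])
--     used.sort()
--     # minimum excludant sweep over the sorted used colors
--     candidate = 0
--     for c in used:
--         if c == candidate:
--             candidate += 1
--         elif c > candidate:
--             break
--     return candidate if candidate < k else None
-- ===== Notes on version B (the rewrite author's own statement) =====
-- stated objective: faster
-- what changed: B never materialises the list of all k colors: it collects the adjacents' colors (same dict-defaulting loop, so the same mutation), sorts them, and finds the minimum excludant in one sweep, returning it if it is < k.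
import Mathlib
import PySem

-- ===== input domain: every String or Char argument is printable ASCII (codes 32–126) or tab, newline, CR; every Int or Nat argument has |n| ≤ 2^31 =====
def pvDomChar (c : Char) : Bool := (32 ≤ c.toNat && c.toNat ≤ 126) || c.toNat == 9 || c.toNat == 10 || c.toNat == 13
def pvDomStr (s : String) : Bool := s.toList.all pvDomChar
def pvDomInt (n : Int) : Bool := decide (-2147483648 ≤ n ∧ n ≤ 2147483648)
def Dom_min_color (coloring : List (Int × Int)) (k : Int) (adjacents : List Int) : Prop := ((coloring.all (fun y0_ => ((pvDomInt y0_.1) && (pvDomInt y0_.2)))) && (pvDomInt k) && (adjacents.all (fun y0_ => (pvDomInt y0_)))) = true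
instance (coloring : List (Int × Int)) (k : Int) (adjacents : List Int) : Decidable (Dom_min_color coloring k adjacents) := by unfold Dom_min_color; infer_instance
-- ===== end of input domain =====

-- B avoids building the list of all k colors: it sorts the adjacents' colors and takes the
-- minimum excludant in one sweep. Both A and B also mutate `coloring` (default-color 0 for
-- uncolored adjacents) identically; the equivalence proved here is about the RETURN value.

-- ===== PORT A =====
def min_color (coloring : List (Int × Int)) (k : Int) (adjacents : List Int) : Option Int :=
  let all0 := PySem.List.pyRange (k - 1) (-1) (-1)
  let st := adjacents.foldl (fun (st : List (Int × Int) × List Int) adj =>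
      -- `adj not in coloring.keys(): coloring[adj] = 0` (dict as assoc list, first-match lookup)
      let col := if (List.lookup adj st.1).isNone then st.1 ++ [(adj, 0)] else st.1
      -- `coloring[adj]`: the key is present here, so getD 0 is exact (no KeyError possible)
      let c := (List.lookup adj col).getD 0
      let colors := if st.2.contains c then (PySem.List.remove? st.2 c).getD st.2 else st.2
      (col, colors)) (coloring, all0)
  if st.2.length = 0 then none
  else (PySem.List.pop? st.2 (-1)).map (·.1)

-- ===== PORT B =====
-- the `for c in used: …` mex sweep of Source B (break = return of the recursion)
def minColorSweep (l : List Int) (cand : Int) : Int :=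
  match l with
  | [] => cand
  | c :: rest =>
      if c = cand then minColorSweep rest (cand + 1)
      else if c > cand then cand
      else minColorSweep rest cand

def min_color_alt (coloring : List (Int × Int)) (k : Int) (adjacents : List Int) : Option Int :=
  let st := adjacents.foldl (fun (st : List (Int × Int) × List Int) adj =>
      let col := if (List.lookup adj st.1).isNone then st.1 ++ [(adj, 0)] else st.1
      (col, st.2 ++ [(List.lookup adj col).getD 0])) (coloring, [])
  let used := PySem.List.sorted st.2 (fun x => x) false
  let cand := minColorSweep used 0
  if cand < k then some cand else none

-- ===== PRECONDITION & SPEC =====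
def Spec_min_color (coloring : List (Int × Int)) (k : Int) (adjacents : List Int) (out : Option Int) : Prop := out = min_color_alt coloring k adjacents
instance (coloring : List (Int × Int)) (k : Int) (adjacents : List Int) (out : Option Int) : Decidable (Spec_min_color coloring k adjacents out) := by unfold Spec_min_color; infer_instance

-- ===== CLAIM (what is proved, stated in full; the proofs are below) =====
def Claim_equal_min_color : Prop := ∀ (coloring : List (Int × Int)) (k : Int) (adjacents : List Int), Dom_min_color coloring k adjacents → Spec_min_color coloring k adjacents (min_color coloring k adjacents)

-- ===== LEMMAS AND PROOFS =====

-- the colors read off the (evolving) dict, one per adjacent, in order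
def usedFrom (d : List (Int × Int)) : List Int → List Int
  | [] => []
  | adj :: rest =>
      let col := if (List.lookup adj d).isNone then d ++ [(adj, 0)] else d
      ((List.lookup adj col).getD 0) :: usedFrom col rest

theorem foldB_used (adjs : List Int) : ∀ (d : List (Int × Int)) (acc : List Int),
    (adjs.foldl (fun (st : List (Int × Int) × List Int) adj =>
      let col := if (List.lookup adj st.1).isNone then st.1 ++ [(adj, 0)] else st.1
      (col, st.2 ++ [(List.lookup adj col).getD 0])) (d, acc)).2
    = acc ++ usedFrom d adjs := by
  induction adjs with
  | nil => intro d acc; simp [usedFrom]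
  | cons a rest ih =>
      intro d acc
      simp only [List.foldl_cons, usedFrom]
      rw [ih]
      simp

theorem foldA_colors (adjs : List Int) : ∀ (d : List (Int × Int)) (colors : List Int),
    colors.Nodup →
    (adjs.foldl (fun (st : List (Int × Int) × List Int) adj =>
      let col := if (List.lookup adj st.1).isNone then st.1 ++ [(adj, 0)] else st.1
      let c := (List.lookup adj col).getD 0
      let colors := if st.2.contains c then (PySem.List.remove? st.2 c).getD st.2 else st.2
      (col, colors)) (d, colors)).2
    = colors.filter (fun c => !(usedFrom d adjs).contains c) := by
  induction adjs with
  | nil => intro d colors hnd; simp [usedFrom]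
  | cons a rest ih =>
      intro d colors hnd
      simp only [List.foldl_cons]
      set col := if (List.lookup a d).isNone then d ++ [(a, 0)] else d with hcol
      set c := (List.lookup a col).getD 0 with hc
      have hstep : (if colors.contains c then (PySem.List.remove? colors c).getD colors else colors)
          = colors.filter (fun x => x != c) := by
        by_cases hmem : c ∈ colors
        · rw [if_pos (by simpa using hmem),
            PySem.List.remove?_eq_some_erase colors c hmem, Option.getD_some,
            hnd.erase_eq_filter]
        · rw [if_neg (by simpa using hmem), Eq.comm, List.filter_eq_self]
          intro x hx
          simp only [bne_iff_ne, ne_eq]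
          rintro rfl
          exact hmem hx
      rw [hstep, ih col _ (hnd.filter _)]
      rw [List.filter_filter]
      have huf : usedFrom d (a :: rest) = c :: usedFrom col rest := by
        simp only [usedFrom]
        rw [← hcol, ← hc]
      rw [huf]
      apply List.filter_congr
      intro x hx
      simp only [List.contains_cons, Bool.not_or, bne, Bool.and_comm]

theorem sweep_ge (l : List Int) : ∀ cand, cand ≤ minColorSweep l cand := by
  induction l with
  | nil => intro cand; simp [minColorSweep]
  | cons c rest ih =>
      intro cand
      simp only [minColorSweep]
      split_ifs with h1 h2
      · have := ih (cand + 1); omega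
      · omega
      · exact ih cand

theorem sweep_notMem (l : List Int) (hs : l.Pairwise (· ≤ ·)) :
    ∀ cand, minColorSweep l cand ∉ l := by
  induction l with
  | nil => intro cand; simp
  | cons c rest ih =>
      intro cand
      have hrest := hs.of_cons
      have hle : ∀ x ∈ rest, c ≤ x := (List.pairwise_cons.mp hs).1
      simp only [minColorSweep]
      split_ifs with h1 h2
      · have hge := sweep_ge rest (cand + 1)
        have hne := ih hrest (cand + 1)
        simp only [List.mem_cons]
        push Not
        exact ⟨by omega, hne⟩
      · simp only [List.mem_cons]
        push Not
        refine ⟨by omega, fun hmem => ?_⟩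
        have := hle _ hmem
        omega
      · have hge := sweep_ge rest cand
        have hne := ih hrest cand
        simp only [List.mem_cons]
        push Not
        exact ⟨by omega, hne⟩

theorem sweep_min (l : List Int) (hs : l.Pairwise (· ≤ ·)) :
    ∀ cand j, cand ≤ j → j < minColorSweep l cand → j ∈ l := by
  induction l with
  | nil => intro cand j h1 h2; simp [minColorSweep] at h2; omega
  | cons c rest ih =>
      intro cand j h1 h2
      have hrest := hs.of_cons
      simp only [minColorSweep] at h2
      split_ifs at h2 with hc1 hc2
      · rcases eq_or_lt_of_le h1 with rfl | hlt
        · simp [hc1]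
        · exact List.mem_cons_of_mem _ (ih hrest (cand + 1) j (by omega) h2)
      · omega
      · exact List.mem_cons_of_mem _ (ih hrest cand j h1 h2)

def ascr (n : Nat) : List Int := (List.range n).map (fun j : Nat => (j : Int))

theorem head_filter_ascr (p : Int → Bool) (r : Int) (hr : 0 ≤ r) (hpr : p r = true)
    (hmin : ∀ j : Int, 0 ≤ j → j < r → p j = false) :
    ∀ n : Nat, ((ascr n).filter p).head? = if r < (n : Int) then some r else none := by
  intro n
  induction n with
  | zero => simp [ascr]; omega
  | succ n ih =>
      have hsnoc : ascr (n + 1) = ascr n ++ [(n : Int)] := by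
        simp [ascr, List.range_succ]
      rw [hsnoc, List.filter_append, List.head?_append, ih]
      by_cases hlt : r < (n : Int)
      · rw [if_pos hlt, if_pos (by omega)]
        rfl
      · rw [if_neg hlt]
        by_cases heq : r = (n : Int)
        · subst heq
          simp only [List.filter_cons, List.filter_nil, hpr, if_pos]
          rw [if_pos (by omega)]
          rfl
        · have hfalse : p (n : Int) = false := hmin (n : Int) (by omega) (by omega)
          simp only [List.filter_cons, List.filter_nil, hfalse]
          have hcond : ¬ r < (((n + 1 : Nat)) : Int) := by omega
          rw [if_neg hcond]
          rfl

theorem desc_reverse (n : Nat) :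
    ((List.range n).map (fun j : Nat => (n : Int) - 1 - j)).reverse = ascr n := by
  apply List.ext_getElem
  · simp [ascr]
  · intro i h1 h2
    have hn : i < n := by simpa [ascr] using h2
    simp only [List.getElem_reverse, List.getElem_map, List.getElem_range, ascr,
      List.length_map, List.length_range]
    omega

theorem last_eq (l : List Int) :
    (if l.length = 0 then (none : Option Int) else (PySem.List.pop? l (-1)).map (·.1)) = l.getLast? := by
  rcases l.eq_nil_or_concat with rfl | ⟨ys, y, rfl⟩
  · simp
  · rw [if_neg (by simp), List.concat_eq_append, PySem.List.pop?_last]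
    simp

-- ===== VERDICT (by name: the statement is the Claim_ definition above) =====
theorem min_color_spec : Claim_equal_min_color := by
  intro coloring k adjacents _
  simp only [Spec_min_color, min_color, min_color_alt]
  have hnodup : (PySem.List.pyRange (k - 1) (-1) (-1)).Nodup := by
    rw [PySem.List.pyRange_neg_one]
    exact (List.nodup_range).map (fun a b h => by omega)
  have hA := foldA_colors adjacents coloring (PySem.List.pyRange (k - 1) (-1) (-1)) hnodup
  have hB := foldB_used adjacents coloring []
  rw [hA, hB, List.nil_append]
  set used := usedFrom coloring adjacents with hused
  set p : Int → Bool := fun c => !used.contains c with hp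
  set r : Int := minColorSweep (PySem.List.sorted used (fun x => x) false) 0 with hrdef
  have hr : 0 ≤ r := sweep_ge _ 0
  have hsorted : (PySem.List.sorted used (fun x => x) false).Pairwise (· ≤ ·) :=
    PySem.List.sorted_pairwise used (fun x => x)
  have hnm : r ∉ used := by
    have := sweep_notMem _ hsorted 0
    rwa [PySem.List.mem_sorted] at this
  have hpr : p r = true := by
    simp only [hp, Bool.not_eq_true']
    simpa using hnm
  have hmin : ∀ j : Int, 0 ≤ j → j < r → p j = false := by
    intro j h0 hj
    have hmem : j ∈ used := by
      have := sweep_min _ hsorted 0 j h0 hj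
      rwa [PySem.List.mem_sorted] at this
    simp only [hp, Bool.not_eq_false']
    simpa using hmem
  rw [last_eq]
  rcases lt_or_ge k 0 with hk | hk
  · have hnil : PySem.List.pyRange (k - 1) (-1) (-1) = [] := by
      rw [PySem.List.pyRange_neg_one]
      have : (k - 1 - -1).toNat = 0 := by omega
      rw [this]
      simp
    rw [hnil]
    rw [if_neg (by omega)]
    rfl
  · have hkk : k - 1 - -1 = k := by ring
    have hkn : ((k.toNat : Nat) : Int) = k := Int.toNat_of_nonneg hk
    have hfun : (fun j : Nat => k - 1 - (j : Int)) = (fun j : Nat => ((k.toNat : Nat) : Int) - 1 - (j : Int)) := by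
      funext j; rw [hkn]
    rw [PySem.List.pyRange_neg_one, hkk, hfun, List.getLast?_eq_head?_reverse,
      ← List.filter_reverse, desc_reverse, head_filter_ascr p r hr hpr hmin k.toNat, hkn]
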